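-- pv_equiv track=rewrite | github.com/BenyaminDelshad/Sindokht | Codes/FreqsCalculator.py | ngram_freqs
-- ===== SOURCE A (Python) =====
-- SEP = u' ' # token separator symbol
--
-- def ngram_freqs(ngrams):
--     """ Builds dict of TOKEN_SEQUENCEs and NEXT_TOKEN frequencies """
--
--     # has form TOKEN_SEQUENCE : DICT OF { NEXT_TOKEN : COUNT }
--     #      e.g        "a b c" : {"d" : 4, "e" : 2, "f" : 6 }
--     counts = {}
--
--     # Using example of ngram "a b c e" ...
--     for ngram in ngrams:
--         token_seq  = SEP.join(ngram[:-1])   # "a b c"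
--         last_token = ngram[-1]              # "e"
--
--         # create empty {NEXT_TOKEN : COUNT} dict if token_seq not seen before
--         if token_seq not in counts:
--             counts[token_seq] = {}
--
--         # initialize count for newly seen next_tokens
--         if last_token not in counts[token_seq]:
--             counts[token_seq][last_token] = 0
--
--         counts[token_seq][last_token] += 1
--
--     return counts
-- ===== SOURCE B (Python) =====
-- SEP = u' ' # token separator symbol
--
-- def ngram_freqs(ngrams):
--     """ Builds dict of TOKEN_SEQUENCEs and NEXT_TOKEN frequencies """
--     # Pass 1: flat aggregation keyed by (token_sequence, next_token)
--     flat = {}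
--     for ngram in ngrams:
--         key = (SEP.join(ngram[:-1]), ngram[-1])
--         flat[key] = flat.get(key, 0) + 1
--     # Pass 2: reshape the flat map (first-seen order) into the nested dict
--     counts = {}
--     for (seq, tok), c in flat.items():
--         counts.setdefault(seq, {})[tok] = c
--     return counts
-- ===== Notes on version B (the rewrite author's own statement) =====
-- stated objective: alternative
-- what changed: B aggregates in one pass into a flat dict keyed by (prefix, next-token) pairs and then reshapes that flat map into the nested dict in a second pass, instead of A's fused nested-dict updates.
import Mathlib
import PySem

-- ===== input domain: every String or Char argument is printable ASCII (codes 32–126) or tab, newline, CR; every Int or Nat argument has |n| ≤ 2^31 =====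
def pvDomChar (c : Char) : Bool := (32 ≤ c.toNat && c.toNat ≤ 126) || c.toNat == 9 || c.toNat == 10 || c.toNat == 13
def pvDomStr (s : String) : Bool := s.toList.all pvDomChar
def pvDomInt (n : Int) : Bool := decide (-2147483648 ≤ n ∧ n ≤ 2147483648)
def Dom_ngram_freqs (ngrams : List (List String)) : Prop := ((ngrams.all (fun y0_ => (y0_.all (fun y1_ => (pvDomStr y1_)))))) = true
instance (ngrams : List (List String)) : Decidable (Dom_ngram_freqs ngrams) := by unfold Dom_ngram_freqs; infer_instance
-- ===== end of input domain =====

-- B separates flat aggregation keyed by (prefix, next-token) from a second regrouping pass,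
-- instead of A's fused nested-dict updates; same cost, different decomposition.

-- ===== PORT A =====
-- Python mutates the inner dict in place; with persistent dicts the write-back is
-- 'counts.insert token_seq …' (overwrite keeps position), which is exact.
def ngram_freqs (ngrams : List (List String)) : List (String × List (String × Int)) :=
  (ngrams.foldl (fun counts ngram =>
      let token_seq := PySem.Str.join " " (PySem.List.slice ngram none (some (-1)))
      let last_token := PySem.List.pyGetD ngram (-1) ""
      let counts := if counts.contains token_seq then counts
                    else counts.insert token_seq PySem.Dict.empty
      let inner := counts.getD token_seq PySem.Dict.empty
      let inner := if inner.contains last_token then inner else inner.insert last_token 0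
      counts.insert token_seq (inner.modify last_token 0 (· + 1)))
    (PySem.Dict.empty : PySem.Dict String (PySem.Dict String Int))).items.map
      (fun p => (p.1, p.2.items))

-- ===== PORT B =====
def ngram_freqs_alt (ngrams : List (List String)) : List (String × List (String × Int)) :=
  ((ngrams.foldl (fun flat ngram =>
        let key := (PySem.Str.join " " (PySem.List.slice ngram none (some (-1))),
                    PySem.List.pyGetD ngram (-1) "")
        flat.insert key (flat.getD key 0 + 1))
      (PySem.Dict.empty : PySem.Dict (String × String) Int)).items.foldl (fun counts x =>
        let counts := counts.setdefault x.1.1 PySem.Dict.empty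
        counts.insert x.1.1 ((counts.getD x.1.1 PySem.Dict.empty).insert x.1.2 x.2))
      (PySem.Dict.empty : PySem.Dict String (PySem.Dict String Int))).items.map
        (fun p => (p.1, p.2.items))

-- ===== PRECONDITION & SPEC =====
-- Pre_ excludes exactly the inputs containing an empty ngram, on which the Python A
-- raises IndexError at ngram[-1] (B raises there too).
def Pre_ngram_freqs (ngrams : List (List String)) : Prop := ∀ g ∈ ngrams, g ≠ []
instance (ngrams : List (List String)) : Decidable (Pre_ngram_freqs ngrams) := by
  unfold Pre_ngram_freqs; infer_instance
def pvWitness_ngram_freqs : List (List String) := [["a", "b"], ["a", "c"], ["a", "b"]]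

def Spec_ngram_freqs (ngrams : List (List String)) (out : List (String × List (String × Int))) : Prop := out = ngram_freqs_alt ngrams
instance (ngrams : List (List String)) (out : List (String × List (String × Int))) : Decidable (Spec_ngram_freqs ngrams out) := by unfold Spec_ngram_freqs; infer_instance

-- ===== CLAIM (what is proved, stated in full; the proofs are below) =====
def Claim_equal_ngram_freqs : Prop := ∀ (ngrams : List (List String)), Dom_ngram_freqs ngrams → Pre_ngram_freqs ngrams → Spec_ngram_freqs ngrams (ngram_freqs ngrams)

-- ===== LEMMAS AND PROOFS =====

def pvKey (g : List String) : String × String :=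
  (PySem.Str.join " " (PySem.List.slice g none (some (-1))), PySem.List.pyGetD g (-1) "")


theorem pv_insert_modify {κ ν : Type} [BEq κ] [LawfulBEq κ] (d : PySem.Dict κ ν) (t : κ) (f : ν → ν) (v0 : ν)
    (h : d.contains t = false) : (d.insert t v0).modify t v0 f = d.modify t v0 f := by
  have hget : d.get? t = none := by
    rw [PySem.Dict.get?_eq_none_iff_contains]; exact h
  have hkeys : ∀ p ∈ d.items, (p.1 == t) = false := by
    intro p hp
    by_contra hb
    simp at hb
    have : t ∈ d.keys := by
      have := PySem.Dict.mem_keys_of_mem_items (d := d) hp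
      rwa [hb] at this
    rw [← PySem.Dict.contains_iff_mem_keys] at this
    simp [h] at this
  have hg2 : (d.insert t v0).get? t = some v0 := PySem.Dict.get?_insert_self d t v0
  simp [PySem.Dict.modify, PySem.Dict.insert, PySem.Dict.getD, h, hget]
  constructor
  · rw [List.map_congr_left (g := id)]
    · exact List.map_id _
    · intro p hp; simp [hkeys p hp]
  · rw [show PySem.Dict.mk (d.items ++ [(t,v0)]) = d.insert t v0 by simp [PySem.Dict.insert, h], hg2]
    simp

def pvStepA (c : PySem.Dict String (PySem.Dict String Int)) (p : String × String) :
    PySem.Dict String (PySem.Dict String Int) :=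
  c.insert p.1 ((c.getD p.1 PySem.Dict.empty).modify p.2 0 (· + 1))

theorem pvStepA_eq (c : PySem.Dict String (PySem.Dict String Int)) (p : String × String) :
    (let c' := if c.contains p.1 then c else c.insert p.1 PySem.Dict.empty
     let inner := c'.getD p.1 PySem.Dict.empty
     let inner := if inner.contains p.2 then inner else inner.insert p.2 0
     c'.insert p.1 (inner.modify p.2 0 (· + 1))) = pvStepA c p := by
  simp only [pvStepA]
  by_cases h1 : c.contains p.1
  · simp only [h1, if_true]
    by_cases h2 : (c.getD p.1 PySem.Dict.empty).contains p.2
    · simp [h2]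
    · simp only [eq_false_of_ne_true h2, if_false, Bool.false_eq_true]
      rw [pv_insert_modify _ _ _ _ (by simpa using h2)]
  · simp only [eq_false_of_ne_true h1, if_false, Bool.false_eq_true]
    rw [PySem.Dict.getD_insert_self, PySem.Dict.insert_insert_self]
    by_cases h2 : (PySem.Dict.empty : PySem.Dict String Int).contains p.2
    · simp [PySem.Dict.contains_empty] at h2
    · rw [if_neg (by simp [PySem.Dict.contains_empty]), pv_insert_modify _ _ _ _ (by simp [PySem.Dict.contains_empty])]
      congr 1
      rw [PySem.Dict.getD_of_not_contains]
      simpa using h1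

theorem pvStepB_eq (c : PySem.Dict String (PySem.Dict String Int)) (x : (String × String) × Int) :
    (let c' := c.setdefault x.1.1 PySem.Dict.empty
     c'.insert x.1.1 ((c'.getD x.1.1 PySem.Dict.empty).insert x.1.2 x.2)) =
    c.insert x.1.1 ((c.getD x.1.1 PySem.Dict.empty).insert x.1.2 x.2) := by
  by_cases h : c.contains x.1.1
  · simp [PySem.Dict.setdefault, h]
  · have h' : c.contains x.1.1 = false := by simpa using h
    simp only [PySem.Dict.setdefault, h', Bool.false_eq_true, if_false,
      PySem.Dict.getD_of_not_contains (h := h')]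
    rw [show PySem.Dict.mk (c.items ++ [(x.1.1, PySem.Dict.empty)]) = c.insert x.1.1 PySem.Dict.empty
          from by simp [PySem.Dict.insert, h'],
        PySem.Dict.getD_insert_self, PySem.Dict.insert_insert_self]

theorem pv_dedup_append {α : Type} [BEq α] [LawfulBEq α] (l : List α) (x : α) :
    PySem.List.dedup (l ++ [x]) = if x ∈ l then PySem.List.dedup l else PySem.List.dedup l ++ [x] := by
  simp only [PySem.List.dedup, PySem.Set.ofList, List.foldl_append, List.foldl_cons, List.foldl_nil,
    PySem.Set.add]
  rw [show List.foldl PySem.Set.add PySem.Set.empty l = PySem.Set.ofList l from rfl]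
  have : (PySem.Set.ofList l).contains x = decide (x ∈ l) := by
    by_cases hx : x ∈ l <;> simp [PySem.Set.contains, PySem.Set.mem_ofList, hx]
  rw [this]
  by_cases hx : x ∈ l <;> simp [hx]

theorem pv_nestedA_keys (l : List (String × String)) :
    (l.foldl pvStepA PySem.Dict.empty).keys = PySem.List.dedup (l.map Prod.fst) := by
  induction l using List.reverseRecOn with
  | nil => simp [PySem.List.dedup, PySem.Set.ofList, PySem.Dict.keys_empty]
  | append_singleton l p ih =>
    rw [List.foldl_append, List.foldl_cons, List.foldl_nil, List.map_append, List.map_cons,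
      List.map_nil, pv_dedup_append]
    simp only [pvStepA]
    by_cases h : (l.foldl pvStepA PySem.Dict.empty).contains p.1
    · rw [PySem.Dict.keys_insert_of_contains (h := h), ih,
        if_pos (by
          have := (PySem.Dict.contains_iff_mem_keys _ _).mp h
          rw [ih] at this
          simpa [PySem.List.mem_dedup] using this)]
    · have h' : (l.foldl pvStepA PySem.Dict.empty).contains p.1 = false := by simpa using h
      rw [PySem.Dict.keys_insert_of_not_contains (h := h'), ih,
        if_neg (by
          intro hx
          apply h
          rw [PySem.Dict.contains_iff_mem_keys _ _, ih]
          simpa [PySem.List.mem_dedup] using hx)]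

theorem pv_nestedA_getD (l : List (String × String)) (s : String) :
    (l.foldl pvStepA PySem.Dict.empty).getD s PySem.Dict.empty
      = PySem.Dict.counter ((l.filter (fun p => p.1 == s)).map Prod.snd) := by
  induction l using List.reverseRecOn generalizing s with
  | nil => simp [PySem.Dict.getD_empty, PySem.Dict.counter]
  | append_singleton l p ih =>
    rw [List.foldl_append, List.foldl_cons, List.foldl_nil, List.filter_append]
    simp only [pvStepA]
    rw [PySem.Dict.getD_insert]
    by_cases hs : s = p.1
    · subst hs
      rw [if_pos rfl, ih]
      simp only [List.filter_cons, List.filter_nil, beq_self_eq_true, if_pos, List.map_append,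
        List.map_cons, List.map_nil, PySem.Dict.counter_append_singleton]
    · rw [if_neg hs, ih]
      have hb : (p.1 == s) = false := by simpa using (Ne.symm hs)
      simp [hb]

def pvStepB (c : PySem.Dict String (PySem.Dict String Int)) (x : (String × String) × Int) :
    PySem.Dict String (PySem.Dict String Int) :=
  c.insert x.1.1 ((c.getD x.1.1 PySem.Dict.empty).insert x.1.2 x.2)

theorem pv_regroup_keys (r : List ((String × String) × Int)) :
    (r.foldl pvStepB PySem.Dict.empty).keys = PySem.List.dedup (r.map (fun x => x.1.1)) := by
  induction r using List.reverseRecOn with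
  | nil => simp [PySem.List.dedup, PySem.Set.ofList, PySem.Dict.keys_empty]
  | append_singleton r p ih =>
    rw [List.foldl_append, List.foldl_cons, List.foldl_nil, List.map_append, List.map_cons,
      List.map_nil, pv_dedup_append]
    simp only [pvStepB]
    by_cases h : (r.foldl pvStepB PySem.Dict.empty).contains p.1.1
    · rw [PySem.Dict.keys_insert_of_contains (h := h), ih,
        if_pos (by
          have := (PySem.Dict.contains_iff_mem_keys _ _).mp h
          rw [ih] at this
          simpa [PySem.List.mem_dedup] using this)]
    · have h' : (r.foldl pvStepB PySem.Dict.empty).contains p.1.1 = false := by simpa using h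
      rw [PySem.Dict.keys_insert_of_not_contains (h := h'), ih,
        if_neg (by
          intro hx
          apply h
          rw [PySem.Dict.contains_iff_mem_keys _ _, ih]
          simpa [PySem.List.mem_dedup] using hx)]

theorem pv_regroup_getD (r : List ((String × String) × Int)) (s : String) :
    (r.foldl pvStepB PySem.Dict.empty).getD s PySem.Dict.empty
      = ((r.filter (fun x => x.1.1 == s)).map (fun x => (x.1.2, x.2))).foldl
          (fun d q => d.insert q.1 q.2) PySem.Dict.empty := by
  induction r using List.reverseRecOn generalizing s with
  | nil => simp [PySem.Dict.getD_empty]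
  | append_singleton r p ih =>
    rw [List.foldl_append, List.foldl_cons, List.foldl_nil, List.filter_append]
    simp only [pvStepB]
    rw [PySem.Dict.getD_insert]
    by_cases hs : s = p.1.1
    · subst hs
      rw [if_pos rfl, ih]
      simp only [List.filter_cons, List.filter_nil, beq_self_eq_true, if_pos, List.map_append,
        List.map_cons, List.map_nil, List.foldl_append, List.foldl_cons, List.foldl_nil]
    · rw [if_neg hs, ih]
      have hb : (p.1.1 == s) = false := by simpa using (Ne.symm hs)
      simp [hb]

theorem pv_dedup_map_dedup {α β : Type} [BEq α] [LawfulBEq α] [BEq β] [LawfulBEq β]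
    (l : List α) (f : α → β) :
    PySem.List.dedup ((PySem.List.dedup l).map f) = PySem.List.dedup (l.map f) := by
  induction l using List.reverseRecOn with
  | nil => simp [PySem.List.dedup, PySem.Set.ofList]
  | append_singleton l x ih =>
    rw [pv_dedup_append, List.map_append, List.map_cons, List.map_nil, pv_dedup_append]
    by_cases hx : x ∈ l
    · rw [if_pos hx, ih, if_pos (List.mem_map_of_mem hx)]
    · rw [if_neg hx, List.map_append, List.map_cons, List.map_nil, pv_dedup_append, ih]
      by_cases hf : f x ∈ l.map f
      · rw [if_pos (by simpa [PySem.List.mem_dedup] using hf), if_pos hf]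
      · rw [if_neg (by simpa [PySem.List.mem_dedup] using hf), if_neg hf]

theorem pv_count_filter (l : List (String × String)) (s t : String) :
    ((l.filter (fun p => p.1 == s)).map Prod.snd).count t = l.count (s, t) := by
  induction l with
  | nil => rfl
  | cons p l ih =>
    rw [List.filter_cons]
    by_cases h1 : p.1 = s
    · simp only [h1, beq_self_eq_true, if_pos, List.map_cons, List.count_cons, ih]
      congr 1
      by_cases h2 : p.2 = t
      · simp [h2, Prod.ext_iff, h1]
      · simp [h2, Prod.ext_iff, h1]
    · have hb : (p.1 == s) = false := by simpa using h1
      rw [if_neg (by simp [hb]), ih, List.count_cons,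
        if_neg (by simp [Prod.ext_iff]; intro h; exact absurd h h1)]
      simp

theorem pv_dedup_filter (l : List (String × String)) (s : String) :
    ((PySem.List.dedup l).filter (fun q => q.1 == s)).map Prod.snd
      = PySem.List.dedup ((l.filter (fun q => q.1 == s)).map Prod.snd) := by
  induction l using List.reverseRecOn with
  | nil => simp [PySem.List.dedup, PySem.Set.ofList]
  | append_singleton l p ih =>
    rw [pv_dedup_append, List.filter_append]
    by_cases hp : p ∈ l
    · rw [if_pos hp, ih]
      by_cases hs : p.1 = s
      · have : (l.filter (fun q => q.1 == s) ++ List.filter (fun q => q.1 == s) [p]).map Prod.snd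
            = (l.filter (fun q => q.1 == s)).map Prod.snd ++ [p.2] := by
          simp [hs]
        rw [this, pv_dedup_append, if_pos (by
          refine List.mem_map.mpr ⟨p, ?_, rfl⟩
          exact List.mem_filter.mpr ⟨hp, by simp [hs]⟩)]
      · have hb : (p.1 == s) = false := by simpa using hs
        simp [hb]
    · rw [if_neg hp, List.filter_append]
      by_cases hs : p.1 = s
      · have hf1 : List.filter (fun q => q.1 == s) [p] = [p] := by simp [hs]
        rw [hf1, List.map_append, List.map_cons, List.map_nil, List.map_append, List.map_cons,
          List.map_nil, ih, pv_dedup_append, if_neg (by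
            intro hmem
            apply hp
            have h2 : (s, p.2) ∈ l := by simpa [PySem.List.mem_dedup] using hmem
            have hpe : p = (s, p.2) := Prod.ext hs rfl
            rwa [hpe])]
      · have hb : (p.1 == s) = false := by simpa using hs
        simp only [List.filter_cons, hb, Bool.false_eq_true, if_false, List.filter_nil,
          List.append_nil]
        exact ih

theorem pv_A_eq (ngrams : List (List String)) :
    ngram_freqs ngrams
      = ((ngrams.map pvKey).foldl pvStepA PySem.Dict.empty).items.map (fun p => (p.1, p.2.items)) := by
  unfold ngram_freqs
  congr 2
  rw [List.foldl_map]
  exact List.foldl_ext _ _ _ (fun c g _ => pvStepA_eq c (pvKey g))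

theorem pv_B_eq (ngrams : List (List String)) :
    ngram_freqs_alt ngrams
      = (((PySem.Dict.counter (ngrams.map pvKey)).items).foldl pvStepB PySem.Dict.empty).items.map
          (fun p => (p.1, p.2.items)) := by
  unfold ngram_freqs_alt
  have hflat : (ngrams.foldl (fun flat ngram =>
        let key := (PySem.Str.join " " (PySem.List.slice ngram none (some (-1))),
                    PySem.List.pyGetD ngram (-1) "")
        flat.insert key (flat.getD key 0 + 1))
      (PySem.Dict.empty : PySem.Dict (String × String) Int))
        = PySem.Dict.counter (ngrams.map pvKey) := by
    rw [← PySem.Dict.foldl_insert_getD_add_one_eq_counter, List.foldl_map]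
    rfl
  rw [hflat]
  congr 2
  exact List.foldl_ext _ _ _ (fun c x _ => pvStepB_eq c x)

theorem pv_main (ngrams : List (List String)) : ngram_freqs ngrams = ngram_freqs_alt ngrams := by
  rw [pv_A_eq, pv_B_eq]
  set l := ngrams.map pvKey with hl
  -- A side
  have hAkeys := pv_nestedA_keys l
  have hAnodup : (l.foldl pvStepA PySem.Dict.empty).keys.Nodup := by
    rw [hAkeys]; exact PySem.List.nodup_dedup _
  rw [PySem.Dict.items_eq_map_keys _ hAnodup PySem.Dict.empty, List.map_map, hAkeys]
  -- B side
  have hr : (PySem.Dict.counter l).items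
      = (PySem.List.dedup l).map (fun q => (q, (l.count q : Int))) := by
    rw [PySem.Dict.items_counter]
    simp [PySem.List.dedup_eq_ofList]
  set r := (PySem.List.dedup l).map (fun q => (q, (l.count q : Int))) with hrdef
  rw [hr]
  have hBkeys := pv_regroup_keys r
  have hBkeys' : (r.foldl pvStepB PySem.Dict.empty).keys = PySem.List.dedup (l.map Prod.fst) := by
    rw [hBkeys, hrdef, List.map_map]
    exact pv_dedup_map_dedup l Prod.fst
  have hBnodup : (r.foldl pvStepB PySem.Dict.empty).keys.Nodup := by
    rw [hBkeys']; exact PySem.List.nodup_dedup _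
  rw [PySem.Dict.items_eq_map_keys _ hBnodup PySem.Dict.empty, List.map_map, hBkeys']
  -- pointwise over the common outer key list
  conv_rhs => rw [List.map_map]
  rw [show List.map (Prod.fst ∘ pvKey) ngrams = List.map Prod.fst l from by
    rw [hl, List.map_map]]
  apply List.map_congr_left
  intro s hs
  simp only [Function.comp_apply]
  congr 1
  -- inner dicts' items
  rw [pv_nestedA_getD, pv_regroup_getD]
  set u := (PySem.List.dedup l).filter (fun q => q.1 == s) with hudef
  have hfil : r.filter (fun x => x.1.1 == s) = u.map (fun q => (q, (l.count q : Int))) := by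
    rw [hrdef, List.filter_map]
    rfl
  have hps : (r.filter (fun x => x.1.1 == s)).map (fun x => (x.1.2, x.2))
      = u.map (fun q => (q.2, (l.count q : Int))) := by
    rw [hfil, List.map_map]
    rfl
  rw [hps]
  have hsnd : u.map Prod.snd = PySem.List.dedup ((l.filter (fun p => p.1 == s)).map Prod.snd) :=
    pv_dedup_filter l s
  have hnodup2 : ((u.map (fun q => (q.2, (l.count q : Int)))).map Prod.fst).Nodup := by
    rw [List.map_map]
    have : (Prod.fst ∘ fun q => (q.2, (l.count q : Int))) = (Prod.snd : String × String → String) := by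
      funext q; rfl
    rw [this, hsnd]
    exact PySem.List.nodup_dedup _
  have hfresh : ((u.map (fun q => (q.2, (l.count q : Int)))).foldl
        (fun d q => d.insert q.1 q.2) (PySem.Dict.empty : PySem.Dict String Int)).items
      = u.map (fun q => (q.2, (l.count q : Int))) := by
    have h := PySem.Dict.items_foldl_insert_fresh (u.map (fun q => (q.2, (l.count q : Int))))
      Prod.fst Prod.snd (PySem.Dict.empty : PySem.Dict String Int)
      (fun a _ => PySem.Dict.contains_empty _) hnodup2
    simpa using h
  rw [hfresh, PySem.Dict.items_counter]
  rw [← PySem.List.dedup_eq_ofList, ← hsnd, List.map_map]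
  apply List.map_congr_left
  intro q hq
  rcases List.mem_filter.mp (hudef ▸ hq) with ⟨hql, hqs⟩
  have hq1 : q.1 = s := by simpa using hqs
  simp only [Function.comp_apply]
  congr 1
  rw [pv_count_filter]
  have hqe : q = (s, q.2) := Prod.ext_iff.mpr ⟨hq1, rfl⟩
  rw [← hqe]

-- ===== VERDICT (by name: the statement is the Claim_ definition above) =====
theorem ngram_freqs_spec : Claim_equal_ngram_freqs := by
  intro ngrams _ _
  unfold Spec_ngram_freqs
  exact pv_main ngrams
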